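-- pv_equiv track=rewrite | github.com/keenerd/satisfiability | python/simplify.py | cancel_difference
-- ===== SOURCE A (Python) =====
-- def cancel_difference(c1, c2):
--     assert len(c1) == len(c2)
--     c3 = []
--     for t1,t2 in zip(c1, c2):
--         if t1 == t2:
--             c3.append(t1)
--     c3 = tuple(c3)
--     assert len(c3) + 1 == len(c1)
--     return c3
-- ===== SOURCE B (Python) =====
-- def cancel_difference(c1, c2):
--     assert len(c1) == len(c2)
--     diffs = [i for i in range(len(c1)) if c1[i] != c2[i]]
--     assert len(diffs) == 1
--     return tuple(c1[:diffs[0]]) + tuple(c1[diffs[0]+1:])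
-- ===== Notes on version B (the rewrite author's own statement) =====
-- stated objective: alternative
-- what changed: Instead of zipping and collecting the equal elements, B locates the single differing index and returns c1 with that position deleted (two slices).
import Mathlib
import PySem

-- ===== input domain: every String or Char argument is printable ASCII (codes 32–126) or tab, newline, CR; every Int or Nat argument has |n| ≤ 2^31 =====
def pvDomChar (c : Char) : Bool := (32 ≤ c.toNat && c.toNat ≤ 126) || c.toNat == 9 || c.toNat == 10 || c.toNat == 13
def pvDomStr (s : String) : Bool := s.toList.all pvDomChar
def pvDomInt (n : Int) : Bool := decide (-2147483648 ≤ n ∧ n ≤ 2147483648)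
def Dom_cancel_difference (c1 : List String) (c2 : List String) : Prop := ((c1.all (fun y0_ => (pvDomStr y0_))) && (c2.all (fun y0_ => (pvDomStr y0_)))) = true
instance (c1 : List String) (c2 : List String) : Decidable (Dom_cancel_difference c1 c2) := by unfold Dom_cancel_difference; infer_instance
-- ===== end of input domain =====

-- B keeps A's contract (equal-length clauses differing in exactly one position) but
-- locates the single differing index and deletes it from c1, instead of collecting
-- the equal elements pairwise; an alternative decomposition, same O(n) cost.

-- ===== PORT A =====
-- zip + append-if loop, literal port of A's for/append
def cancel_difference (c1 : List String) (c2 : List String) : List String :=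
  (c1.zip c2).foldl (fun c3 t => if t.1 == t.2 then c3 ++ [t.1] else c3) []

-- ===== PORT B =====
-- diffs = [i for i in range(len(c1)) if c1[i] != c2[i]]; indices from range are in
-- bounds, so c1[i] is getD i "" exactly. diffs[0] raises when diffs == [] (the
-- assert fires first in Python anyway); both lie outside Pre_, the match's [] arm
-- is that unreachable case.
def cancel_difference_alt (c1 : List String) (c2 : List String) : List String :=
  let diffs := (List.range c1.length).filter (fun i => c1.getD i "" ≠ c2.getD i "")
  match diffs with
  | [] => []
  | d :: _ =>
      PySem.List.slice c1 none (some (d : Int)) ++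
      PySem.List.slice c1 (some ((d : Int) + 1)) none

-- ===== PRECONDITION & SPEC =====
-- Pre_ = exactly A's two asserts: equal lengths and exactly one differing position.
def Pre_cancel_difference (c1 : List String) (c2 : List String) : Prop :=
  c1.length = c2.length ∧ (c1.zip c2).countP (fun t => t.1 ≠ t.2) = 1
instance (c1 : List String) (c2 : List String) : Decidable (Pre_cancel_difference c1 c2) := by unfold Pre_cancel_difference; infer_instance
def pvWitness_cancel_difference : List String × List String := (["a", "b", "c"], ["a", "x", "c"])

def Spec_cancel_difference (c1 : List String) (c2 : List String) (out : List String) : Prop := out = cancel_difference_alt c1 c2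
instance (c1 : List String) (c2 : List String) (out : List String) : Decidable (Spec_cancel_difference c1 c2 out) := by unfold Spec_cancel_difference; infer_instance

-- ===== CLAIM (what is proved, stated in full; the proofs are below) =====
def Claim_equal_cancel_difference : Prop := ∀ (c1 : List String) (c2 : List String), Dom_cancel_difference c1 c2 → Pre_cancel_difference c1 c2 → Spec_cancel_difference c1 c2 (cancel_difference c1 c2)

-- ===== LEMMAS AND PROOFS =====

-- A's loop is filter-then-project.
theorem cancel_difference_eq_filter (c1 c2 : List String) :
    cancel_difference c1 c2
      = ((c1.zip c2).filter (fun t => t.1 == t.2)).map Prod.fst := by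
  unfold cancel_difference
  rw [PySem.List.foldl_append_if]
  simp

-- B rewritten through take/drop at the head index of diffs.
theorem cancel_difference_alt_eq (c1 c2 : List String) :
    cancel_difference_alt c1 c2
      = match (List.range c1.length).filter (fun i => c1.getD i "" ≠ c2.getD i "") with
        | [] => []
        | d :: _ => c1.take d ++ c1.drop (d + 1) := by
  unfold cancel_difference_alt
  cases h : (List.range c1.length).filter (fun i => c1.getD i "" ≠ c2.getD i "") with
  | nil => rfl
  | cons d rest =>
      have h1 : ((d : Int) + 1) = ((d + 1 : Nat) : Int) := by push_cast; ring
      simp only [h1, PySem.List.slice_to_natCast, PySem.List.slice_from_natCast]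

-- diffs of a cons step (Nat.succ is the successor map over the tail's indices).
theorem diffs_cons (a b : String) (c1 c2 : List String) :
    (List.range (a :: c1).length).filter
        (fun i => (a :: c1).getD i "" ≠ (b :: c2).getD i "")
      = (if a ≠ b then [0] else [])
        ++ ((List.range c1.length).filter (fun i => c1.getD i "" ≠ c2.getD i "")).map Nat.succ := by
  simp only [List.length_cons, List.range_succ_eq_map, List.filter_cons, List.filter_map]
  by_cases hab : a = b
  · simp [hab, Function.comp_def]; rfl
  · simp [hab, Function.comp_def]; rfl

-- getD agreement at an in-range index from elementwise equality
theorem getD_eq_of_getElem_eq (c1 c2 : List String) (i : Nat)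
    (hi : i < c1.length) (hi2 : i < c2.length) (h : c1[i] = c2[i]) :
    c1.getD i "" = c2.getD i "" := by
  simp [List.getD, List.getElem?_eq_getElem hi, List.getElem?_eq_getElem hi2, h]

-- the core induction: with exactly one differing pair, keeping the equal elements
-- equals deleting the first differing index; with none, it is the identity.
theorem main_lemma (c1 c2 : List String) (hl : c1.length = c2.length) :
    ((c1.zip c2).countP (fun t => t.1 ≠ t.2) = 1 →
      ((c1.zip c2).filter (fun t => t.1 == t.2)).map Prod.fst
        = (match (List.range c1.length).filter (fun i => c1.getD i "" ≠ c2.getD i "") with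
           | [] => []
           | d :: _ => c1.take d ++ c1.drop (d + 1)))
    ∧ ((c1.zip c2).countP (fun t => t.1 ≠ t.2) = 0 →
      ((c1.zip c2).filter (fun t => t.1 == t.2)).map Prod.fst = c1) := by
  induction c1 generalizing c2 with
  | nil => cases c2 with
    | nil => simp
    | cons b c2 => simp at hl
  | cons a c1 ih =>
    cases c2 with
    | nil => simp at hl
    | cons b c2 =>
      simp only [List.length_cons, Nat.succ.injEq] at hl
      have IH := ih c2 hl
      constructor
      · intro hc
        rw [diffs_cons]
        by_cases hab : a = b
        · subst hab
          have hc' : (c1.zip c2).countP (fun t => t.1 ≠ t.2) = 1 := by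
            simpa using hc
          simp only [ne_eq, not_true_eq_false, not_false_eq_true, if_neg, List.nil_append]
          have h1 := IH.1 hc'
          cases hd : (List.range c1.length).filter (fun i => c1.getD i "" ≠ c2.getD i "") with
          | nil =>
            -- count = 1 but no differing index: impossible
            exfalso
            have hpos : 0 < (c1.zip c2).countP (fun t => t.1 ≠ t.2) := by omega
            rcases List.countP_pos_iff.mp hpos with ⟨t, ht, hpt⟩
            have hne2 : t.1 ≠ t.2 := by simpa using hpt
            rcases List.mem_iff_getElem.mp ht with ⟨i, hi, hti⟩
            have hi1 : i < c1.length := by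
              simp only [List.length_zip, hl, Nat.min_self] at hi; omega
            have hi2 : i < c2.length := by omega
            have hmemd : i ∈ (List.range c1.length).filter
                (fun i => c1.getD i "" ≠ c2.getD i "") := by
              simp only [List.mem_filter, List.mem_range]
              refine ⟨hi1, ?_⟩
              have hteq : t = (c1[i], c2[i]) := by
                rw [← hti]; simp [List.getElem_zip]
              have hne3 : c1[i] ≠ c2[i] := by rw [hteq] at hne2; exact hne2
              simp only [List.getD, List.getElem?_eq_getElem hi1,
                List.getElem?_eq_getElem hi2, Option.getD_some]
              simpa using hne3
            rw [hd] at hmemd; simp at hmemd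
          | cons d rest =>
            rw [hd] at h1
            simp only [List.zip_cons_cons, List.filter_cons, BEq.rfl, if_pos, List.map_cons,
              List.map_cons]
            rw [h1]
            simp [Nat.succ_eq_add_one]
        · -- a ≠ b : the head is the one difference, the tails are equal
          have hc0 : (c1.zip c2).countP (fun t => t.1 ≠ t.2) = 0 := by
            have h' : (c1.zip c2).countP (fun t => t.1 ≠ t.2) + 1 = 1 := by
              simpa [List.countP_cons, hab] using hc
            omega
          have h0 := IH.2 hc0
          have hd0 : (List.range c1.length).filter (fun i => c1.getD i "" ≠ c2.getD i "") = [] := by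
            rw [List.filter_eq_nil_iff]
            intro i hi
            simp only [List.mem_range] at hi
            have hi2 : i < c2.length := by omega
            have hall : ∀ t ∈ c1.zip c2, ¬ (t.1 ≠ t.2) := by
              intro t ht
              have := List.countP_eq_zero.mp hc0 t ht
              simpa using this
            have hmem : (c1[i], c2[i]) ∈ c1.zip c2 := by
              have hlen : i < (c1.zip c2).length := by
                simp only [List.length_zip, hl, Nat.min_self]; omega
              have hget : (c1.zip c2)[i]'hlen = (c1[i], c2[i]) := by
                simp [List.getElem_zip]
              rw [← hget]; exact List.getElem_mem _
            have heq : c1[i] = c2[i] := by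
              have := hall _ hmem
              simpa using this
            have hgd := getD_eq_of_getElem_eq c1 c2 i hi hi2 heq
            rw [hgd]; simp
          rw [hd0]
          simp only [if_pos hab, List.map_nil, List.append_nil]
          simp only [List.zip_cons_cons, List.filter_cons]
          rw [if_neg (by simpa using hab)]
          rw [h0]
          simp
      · intro hc
        by_cases hab : a = b
        · subst hab
          have hc0 : (c1.zip c2).countP (fun t => t.1 ≠ t.2) = 0 := by simpa using hc
          simp only [List.zip_cons_cons, List.filter_cons, BEq.rfl, if_pos, List.map_cons]
          rw [IH.2 hc0]
        · exfalso
          simp [hab] at hc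

-- ===== VERDICT (by name: the statement is the Claim_ definition above) =====
theorem cancel_difference_spec : Claim_equal_cancel_difference := by
  intro c1 c2 _ hpre
  unfold Spec_cancel_difference
  rcases hpre with ⟨hl, hc⟩
  rw [cancel_difference_eq_filter, cancel_difference_alt_eq]
  exact (main_lemma c1 c2 hl).1 hc
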